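-- pv_equiv track=rewrite | github.com/LynxTWO/mix-marriage-offline | src/mmo/exporters/csv_recall.py | _gate_summary
-- ===== SOURCE A (Python) =====
-- from typing import Any, Dict, Iterable, List
--
-- def _gate_summary(rec: Dict[str, Any]) -> str:
--     gate_results = rec.get("gate_results")
--     if not isinstance(gate_results, list) or not gate_results:
--         return ""
--     # Keep gate contexts in a fixed order so the summary reads the same way in
--     # CSV exports, CLI output, and tests.
--     context_order = {"suggest": 0, "auto_apply": 1, "render": 2}
--     parts = []
--     for result in sorted(
--         [r for r in gate_results if isinstance(r, dict)],
--         key=lambda item: (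
--             context_order.get(str(item.get("context", "")), 99),
--             str(item.get("gate_id", "")),
--         ),
--     ):
--         context = str(result.get("context", ""))
--         outcome = str(result.get("outcome", ""))
--         gate_id = str(result.get("gate_id", ""))
--         reason_id = str(result.get("reason_id", ""))
--         parts.append(f"{context}:{outcome}({gate_id}|{reason_id})")
--     return ";".join(parts)
-- ===== SOURCE B (Python) =====
-- # B: bucket by context in one pass (fixed order suggest/auto_apply/render/other),
-- # sort each bucket by gate_id only, then format — replaces A's composite-key sort.
-- def _gate_summary(rec):
--     gate_results = rec.get("gate_results")
--     if not isinstance(gate_results, list) or not gate_results: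
--         return ""
--     buckets = {"suggest": [], "auto_apply": [], "render": [], None: []}
--     for r in gate_results:
--         if isinstance(r, dict):
--             ctx = str(r.get("context", ""))
--             buckets[ctx if ctx in buckets else None].append(r)
--     pieces = [
--         f'{str(r.get("context", ""))}:{str(r.get("outcome", ""))}'
--         f'({str(r.get("gate_id", ""))}|{str(r.get("reason_id", ""))})'
--         for key in ("suggest", "auto_apply", "render", None)
--         for r in sorted(buckets[key], key=lambda d: str(d.get("gate_id", "")))
--     ]
--     return ";".join(pieces)
-- ===== Notes on version B (the rewrite author's own statement) =====
-- stated objective: alternative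
-- what changed: Replaces A's single composite-key (context-rank, gate_id) sort over all results by a one-pass bucketing into the fixed context order suggest/auto_apply/render/other followed by a stable gate_id-only sort inside each bucket, formatting with a comprehension instead of an append loop.
import Mathlib
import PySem

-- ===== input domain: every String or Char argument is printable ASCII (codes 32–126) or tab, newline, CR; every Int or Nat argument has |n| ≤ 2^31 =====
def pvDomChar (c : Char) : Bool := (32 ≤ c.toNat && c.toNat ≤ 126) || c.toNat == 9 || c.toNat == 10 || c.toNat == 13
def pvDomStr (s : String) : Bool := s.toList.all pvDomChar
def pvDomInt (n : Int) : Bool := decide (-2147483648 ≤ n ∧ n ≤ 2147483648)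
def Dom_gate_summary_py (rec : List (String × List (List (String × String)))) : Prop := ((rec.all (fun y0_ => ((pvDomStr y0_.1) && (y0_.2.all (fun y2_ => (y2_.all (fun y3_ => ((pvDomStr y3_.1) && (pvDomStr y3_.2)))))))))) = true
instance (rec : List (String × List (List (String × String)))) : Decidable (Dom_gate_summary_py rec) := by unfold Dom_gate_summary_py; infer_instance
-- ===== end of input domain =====

-- B replaces A's composite-key sort by fixed-order context buckets each sorted by gate_id only (alternative decomposition, same result).
-- ===== PORT A =====
-- str(result.get(k, "")) : at this type every value is already a String, so str() is the identity.
def pvGetS (d : List (String × String)) (k : String) : String :=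
  PySem.Dict.getD (PySem.Dict.mk d) k ""

def gate_summary_py (rec : List (String × List (List (String × String)))) : String :=
  match (PySem.Dict.mk rec).get? "gate_results" with
  | none => ""          -- rec.get returned None: not a list
  | some gate_results =>
    if gate_results = [] then ""
    else
      let context_order : PySem.Dict String Int :=
        PySem.Dict.mk [("suggest", 0), ("auto_apply", 1), ("render", 2)]
      -- [r for r in gate_results if isinstance(r, dict)]: at this type every element is a dict
      let filtered := gate_results.filter (fun _r => true)
      let sorted_results := PySem.List.sorted2 filtered
        (fun item => context_order.getD (pvGetS item "context") 99)
        (fun item => pvGetS item "gate_id")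
      let parts := sorted_results.foldl (fun acc result =>
        let context := pvGetS result "context"
        let outcome := pvGetS result "outcome"
        let gate_id := pvGetS result "gate_id"
        let reason_id := pvGetS result "reason_id"
        acc ++ [context ++ ":" ++ outcome ++ "(" ++ gate_id ++ "|" ++ reason_id ++ ")"]) []
      PySem.Str.join ";" parts

-- ===== PORT B =====
-- one bucketing step: append r to the bucket named by its context ("other" last)
def pvBStep (b : List (List (String × String)) × List (List (String × String)) × List (List (String × String)) × List (List (String × String)))
    (r : List (String × String)) :
    List (List (String × String)) × List (List (String × String)) × List (List (String × String)) × List (List (String × String)) :=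
  let ctx := pvGetS r "context"
  if ctx = "suggest" then (b.1 ++ [r], b.2.1, b.2.2.1, b.2.2.2)
  else if ctx = "auto_apply" then (b.1, b.2.1 ++ [r], b.2.2.1, b.2.2.2)
  else if ctx = "render" then (b.1, b.2.1, b.2.2.1 ++ [r], b.2.2.2)
  else (b.1, b.2.1, b.2.2.1, b.2.2.2 ++ [r])

def gate_summary_py_alt (rec : List (String × List (List (String × String)))) : String :=
  match (PySem.Dict.mk rec).get? "gate_results" with
  | none => ""
  | some gate_results =>
    if gate_results = [] then ""
    else
      let buckets := gate_results.foldl pvBStep ([], [], [], [])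
      let gid := fun (d : List (String × String)) => pvGetS d "gate_id"
      let ordered := PySem.List.sorted buckets.1 gid ++ PySem.List.sorted buckets.2.1 gid
          ++ PySem.List.sorted buckets.2.2.1 gid ++ PySem.List.sorted buckets.2.2.2 gid
      let pieces := ordered.map (fun r =>
        pvGetS r "context" ++ ":" ++ pvGetS r "outcome"
          ++ "(" ++ pvGetS r "gate_id" ++ "|" ++ pvGetS r "reason_id" ++ ")")
      PySem.Str.join ";" pieces

-- ===== PRECONDITION & SPEC =====
def Spec_gate_summary_py (rec : List (String × List (List (String × String)))) (out : String) : Prop := out = gate_summary_py_alt rec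
instance (rec : List (String × List (List (String × String)))) (out : String) : Decidable (Spec_gate_summary_py rec out) := by unfold Spec_gate_summary_py; infer_instance

-- ===== CLAIM (what is proved, stated in full; the proofs are below) =====
def Claim_equal_gate_summary_py : Prop := ∀ (rec : List (String × List (List (String × String)))), Dom_gate_summary_py rec → Spec_gate_summary_py rec (gate_summary_py rec)

-- ===== LEMMAS AND PROOFS =====

lemma insertBy_append_of_not_before {α : Type} (p : α → α → Bool) (x : α) (as bs : List α)
    (h : ∀ a ∈ as, p x a = false) :
    PySem.List.insertBy p x (as ++ bs) = as ++ PySem.List.insertBy p x bs := by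
  induction as with
  | nil => rfl
  | cons a t ih =>
    simp only [List.cons_append, PySem.List.insertBy, h a (by simp)]
    simp only [Bool.false_eq_true, if_false, List.cons.injEq, true_and]
    exact ih (fun a ha => h a (by simp [ha]))

lemma insertBy_append_of_before {α : Type} (p : α → α → Bool) (x : α) (as bs : List α)
    (h : ∀ b ∈ bs, p x b = true) :
    PySem.List.insertBy p x (as ++ bs) = PySem.List.insertBy p x as ++ bs := by
  induction as with
  | nil =>
    cases bs with
    | nil => rfl
    | cons b t => simp [PySem.List.insertBy, h b (by simp)]
  | cons a t ih =>
    by_cases hpa : p x a = true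
    · simp [PySem.List.insertBy, hpa]
    · show PySem.List.insertBy p x (a :: (t ++ bs)) = PySem.List.insertBy p x (a :: t) ++ bs
      simp only [PySem.List.insertBy, hpa, Bool.false_eq_true, if_false, List.cons_append]
      rw [ih]

lemma insertBy_congr {α : Type} (p q : α → α → Bool) (x : α) (ys : List α)
    (h : ∀ y ∈ ys, p x y = q x y) :
    PySem.List.insertBy p x ys = PySem.List.insertBy q x ys := by
  induction ys with
  | nil => rfl
  | cons y t ih =>
    simp only [PySem.List.insertBy, h y (by simp)]
    by_cases hq : q x y = true
    · simp [hq]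
    · simp only [hq, Bool.false_eq_true, if_false, List.cons.injEq, true_and]
      exact ih (fun z hz => h z (by simp [hz]))

-- the lexicographic "before" used by sorted2 for key x ↦ (k1 x, k2 x)
def pvLex {α : Type} (k1 : α → Int) (k2 : α → String) (a b : α) : Bool :=
  decide (k1 a < k1 b) || (!decide (k1 b < k1 a) && decide (k2 a < k2 b))

lemma sorted2_eq_foldl {α : Type} (xs : List α) (k1 : α → Int) (k2 : α → String) :
    PySem.List.sorted2 xs k1 k2 = xs.foldl (fun acc x => PySem.List.insertBy (pvLex k1 k2) x acc) [] := rfl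

lemma mem_sorted_filter {α : Type} (xs : List α) (p : α → Bool) (k2 : α → String) (a : α)
    (ha : a ∈ PySem.List.sorted (xs.filter p) k2) : p a = true := by
  have := (PySem.List.mem_sorted _ _ _ _).mp ha
  exact (List.mem_filter.mp this).2

lemma lex_lt {α : Type} (k1 : α → Int) (k2 : α → String) (x b : α) (hlt : k1 x < k1 b) :
    pvLex k1 k2 x b = true := by simp [pvLex, hlt]

lemma lex_gt {α : Type} (k1 : α → Int) (k2 : α → String) (x b : α) (hgt : k1 b < k1 x) :
    pvLex k1 k2 x b = false := by
  have h1 : ¬ (k1 x < k1 b) := by omega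
  simp [pvLex, h1, hgt]

lemma lex_eq {α : Type} (k1 : α → Int) (k2 : α → String) (x b : α) (heq : k1 x = k1 b) :
    pvLex k1 k2 x b = decide (k2 x < k2 b) := by simp [pvLex, heq]

lemma sorted_append_singleton {α : Type} (l : List α) (x : α) (k2 : α → String) :
    PySem.List.sorted (l ++ [x]) k2 =
      PySem.List.insertBy (fun a b => decide (k2 a < k2 b)) x (PySem.List.sorted l k2) := by
  rw [PySem.List.sorted_eq_foldl_insertBy, PySem.List.sorted_eq_foldl_insertBy, List.foldl_append]
  rfl

-- stable composite-key sort with ranks in {0,1,2,99} = concatenation of the per-rank stable sorts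
lemma sorted2_buckets {α : Type} (xs : List α) (k1 : α → Int) (k2 : α → String)
    (h : ∀ x ∈ xs, k1 x = 0 ∨ k1 x = 1 ∨ k1 x = 2 ∨ k1 x = 99) :
    PySem.List.sorted2 xs k1 k2 =
      PySem.List.sorted (xs.filter (fun x => k1 x == 0)) k2
      ++ (PySem.List.sorted (xs.filter (fun x => k1 x == 1)) k2
      ++ (PySem.List.sorted (xs.filter (fun x => k1 x == 2)) k2
      ++ PySem.List.sorted (xs.filter (fun x => k1 x == 99)) k2)) := by
  induction xs using List.reverseRecOn with
  | nil => rfl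
  | append_singleton t x ih =>
    have ht : ∀ y ∈ t, k1 y = 0 ∨ k1 y = 1 ∨ k1 y = 2 ∨ k1 y = 99 :=
      fun y hy => h y (List.mem_append_left _ hy)
    have hx := h x (by simp)
    have hstep : PySem.List.sorted2 (t ++ [x]) k1 k2 =
        PySem.List.insertBy (pvLex k1 k2) x (PySem.List.sorted2 t k1 k2) := by
      rw [sorted2_eq_foldl, sorted2_eq_foldl, List.foldl_append]; rfl
    have m0 : ∀ a ∈ PySem.List.sorted (t.filter (fun y => k1 y == 0)) k2, k1 a = 0 :=
      fun a ha => by simpa using mem_sorted_filter _ _ _ _ ha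
    have m1 : ∀ a ∈ PySem.List.sorted (t.filter (fun y => k1 y == 1)) k2, k1 a = 1 :=
      fun a ha => by simpa using mem_sorted_filter _ _ _ _ ha
    have m2 : ∀ a ∈ PySem.List.sorted (t.filter (fun y => k1 y == 2)) k2, k1 a = 2 :=
      fun a ha => by simpa using mem_sorted_filter _ _ _ _ ha
    have m99 : ∀ a ∈ PySem.List.sorted (t.filter (fun y => k1 y == 99)) k2, k1 a = 99 :=
      fun a ha => by simpa using mem_sorted_filter _ _ _ _ ha
    rw [hstep, ih ht]
    rcases hx with hx | hx | hx | hx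
    · -- rank 0: x goes into the first bucket
      have hf : List.filter (fun y => k1 y == (0:Int)) (t ++ [x])
          = t.filter (fun y => k1 y == (0:Int)) ++ [x] := by simp [hx]
      have hf1 : List.filter (fun y => k1 y == (1:Int)) (t ++ [x])
          = t.filter (fun y => k1 y == (1:Int)) := by simp [hx]
      have hf2 : List.filter (fun y => k1 y == (2:Int)) (t ++ [x])
          = t.filter (fun y => k1 y == (2:Int)) := by simp [hx]
      have hf99 : List.filter (fun y => k1 y == (99:Int)) (t ++ [x])
          = t.filter (fun y => k1 y == (99:Int)) := by simp [hx]
      rw [hf, hf1, hf2, hf99, sorted_append_singleton]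
      rw [insertBy_append_of_before _ _ _ _ (by
        intro b hb
        rcases List.mem_append.mp hb with hb | hb
        · exact lex_lt _ _ _ _ (by rw [hx, m1 b hb]; norm_num)
        · rcases List.mem_append.mp hb with hb | hb
          · exact lex_lt _ _ _ _ (by rw [hx, m2 b hb]; norm_num)
          · exact lex_lt _ _ _ _ (by rw [hx, m99 b hb]; norm_num))]
      rw [insertBy_congr (pvLex k1 k2) (fun a b => decide (k2 a < k2 b)) x _
        (fun y hy => lex_eq _ _ _ _ (by rw [hx, m0 y hy]))]
    · -- rank 1
      have hf : List.filter (fun y => k1 y == (1:Int)) (t ++ [x])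
          = t.filter (fun y => k1 y == (1:Int)) ++ [x] := by simp [hx]
      have hf0 : List.filter (fun y => k1 y == (0:Int)) (t ++ [x])
          = t.filter (fun y => k1 y == (0:Int)) := by simp [hx]
      have hf2 : List.filter (fun y => k1 y == (2:Int)) (t ++ [x])
          = t.filter (fun y => k1 y == (2:Int)) := by simp [hx]
      have hf99 : List.filter (fun y => k1 y == (99:Int)) (t ++ [x])
          = t.filter (fun y => k1 y == (99:Int)) := by simp [hx]
      rw [hf, hf0, hf2, hf99, sorted_append_singleton]
      rw [insertBy_append_of_not_before _ _ _ _
        (fun a ha => lex_gt _ _ _ _ (by rw [hx, m0 a ha]; norm_num))]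
      rw [insertBy_append_of_before _ _ _ _ (by
        intro b hb
        rcases List.mem_append.mp hb with hb | hb
        · exact lex_lt _ _ _ _ (by rw [hx, m2 b hb]; norm_num)
        · exact lex_lt _ _ _ _ (by rw [hx, m99 b hb]; norm_num))]
      rw [insertBy_congr (pvLex k1 k2) (fun a b => decide (k2 a < k2 b)) x _
        (fun y hy => lex_eq _ _ _ _ (by rw [hx, m1 y hy]))]
    · -- rank 2
      have hf : List.filter (fun y => k1 y == (2:Int)) (t ++ [x])
          = t.filter (fun y => k1 y == (2:Int)) ++ [x] := by simp [hx]
      have hf0 : List.filter (fun y => k1 y == (0:Int)) (t ++ [x])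
          = t.filter (fun y => k1 y == (0:Int)) := by simp [hx]
      have hf1 : List.filter (fun y => k1 y == (1:Int)) (t ++ [x])
          = t.filter (fun y => k1 y == (1:Int)) := by simp [hx]
      have hf99 : List.filter (fun y => k1 y == (99:Int)) (t ++ [x])
          = t.filter (fun y => k1 y == (99:Int)) := by simp [hx]
      rw [hf, hf0, hf1, hf99, sorted_append_singleton]
      rw [insertBy_append_of_not_before _ _ _ _
        (fun a ha => lex_gt _ _ _ _ (by rw [hx, m0 a ha]; norm_num))]
      rw [insertBy_append_of_not_before _ _ _ _
        (fun a ha => lex_gt _ _ _ _ (by rw [hx, m1 a ha]; norm_num))]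
      rw [insertBy_append_of_before _ _ _ _
        (fun b hb => lex_lt _ _ _ _ (by rw [hx, m99 b hb]; norm_num))]
      rw [insertBy_congr (pvLex k1 k2) (fun a b => decide (k2 a < k2 b)) x _
        (fun y hy => lex_eq _ _ _ _ (by rw [hx, m2 y hy]))]
    · -- rank 99: x goes into the last bucket
      have hf : List.filter (fun y => k1 y == (99:Int)) (t ++ [x])
          = t.filter (fun y => k1 y == (99:Int)) ++ [x] := by simp [hx]
      have hf0 : List.filter (fun y => k1 y == (0:Int)) (t ++ [x])
          = t.filter (fun y => k1 y == (0:Int)) := by simp [hx]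
      have hf1 : List.filter (fun y => k1 y == (1:Int)) (t ++ [x])
          = t.filter (fun y => k1 y == (1:Int)) := by simp [hx]
      have hf2 : List.filter (fun y => k1 y == (2:Int)) (t ++ [x])
          = t.filter (fun y => k1 y == (2:Int)) := by simp [hx]
      rw [hf, hf0, hf1, hf2, sorted_append_singleton]
      rw [insertBy_append_of_not_before _ _ _ _
        (fun a ha => lex_gt _ _ _ _ (by rw [hx, m0 a ha]; norm_num))]
      rw [insertBy_append_of_not_before _ _ _ _
        (fun a ha => lex_gt _ _ _ _ (by rw [hx, m1 a ha]; norm_num))]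
      rw [insertBy_append_of_not_before _ _ _ _
        (fun a ha => lex_gt _ _ _ _ (by rw [hx, m2 a ha]; norm_num))]
      rw [insertBy_congr (pvLex k1 k2) (fun a b => decide (k2 a < k2 b)) x _
        (fun y hy => lex_eq _ _ _ _ (by rw [hx, m99 y hy]))]

-- the bucketing loop of B computes the four context filters
lemma bucket_loop_eq (xs : List (List (String × String)))
    (a b c d : List (List (String × String))) :
    xs.foldl pvBStep (a, b, c, d) =
      (a ++ xs.filter (fun r => pvGetS r "context" == "suggest"),
       b ++ xs.filter (fun r => pvGetS r "context" == "auto_apply"),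
       c ++ xs.filter (fun r => pvGetS r "context" == "render"),
       d ++ xs.filter (fun r => !(pvGetS r "context" == "suggest")
              && !(pvGetS r "context" == "auto_apply") && !(pvGetS r "context" == "render"))) := by
  induction xs generalizing a b c d with
  | nil => simp
  | cons r t ih =>
    simp only [List.foldl_cons, List.filter_cons]
    by_cases h1 : pvGetS r "context" = "suggest"
    · simp [pvBStep, h1, ih]
    · by_cases h2 : pvGetS r "context" = "auto_apply"
      · simp [pvBStep, h1, h2, ih]
      · by_cases h3 : pvGetS r "context" = "render"
        · simp [pvBStep, h1, h2, h3, ih]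
        · simp [pvBStep, h1, h2, h3, ih]

-- A's context rank as a plain conditional
lemma rank_eq (r : List (String × String)) :
    (PySem.Dict.mk [("suggest", (0:Int)), ("auto_apply", 1), ("render", 2)]).getD (pvGetS r "context") 99
      = (if pvGetS r "context" = "suggest" then 0
         else if pvGetS r "context" = "auto_apply" then 1
         else if pvGetS r "context" = "render" then 2 else 99) := by
  generalize pvGetS r "context" = s
  by_cases h1 : s = "suggest"
  · simp [h1, PySem.Dict.getD, PySem.Dict.get?_mk_cons]
  · by_cases h2 : s = "auto_apply"
    · simp [h2, PySem.Dict.getD, PySem.Dict.get?_mk_cons]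
    · by_cases h3 : s = "render"
      · simp [h3, PySem.Dict.getD, PySem.Dict.get?_mk_cons]
      · simp [h1, h2, h3, PySem.Dict.getD, PySem.Dict.get?_mk_cons, PySem.Dict.get?,
          beq_eq_false_iff_ne, Ne.symm h1, Ne.symm h2, Ne.symm h3]

lemma rank0_iff (r : List (String × String)) :
    ((PySem.Dict.mk [("suggest", (0:Int)), ("auto_apply", 1), ("render", 2)]).getD (pvGetS r "context") 99 == (0:Int))
      = (pvGetS r "context" == "suggest") := by
  rw [rank_eq]; split_ifs <;> simp_all

lemma rank1_iff (r : List (String × String)) :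
    ((PySem.Dict.mk [("suggest", (0:Int)), ("auto_apply", 1), ("render", 2)]).getD (pvGetS r "context") 99 == (1:Int))
      = (pvGetS r "context" == "auto_apply") := by
  rw [rank_eq]; split_ifs <;> simp_all

lemma rank2_iff (r : List (String × String)) :
    ((PySem.Dict.mk [("suggest", (0:Int)), ("auto_apply", 1), ("render", 2)]).getD (pvGetS r "context") 99 == (2:Int))
      = (pvGetS r "context" == "render") := by
  rw [rank_eq]; split_ifs <;> simp_all

lemma rank99_iff (r : List (String × String)) :
    ((PySem.Dict.mk [("suggest", (0:Int)), ("auto_apply", 1), ("render", 2)]).getD (pvGetS r "context") 99 == (99:Int))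
      = (!(pvGetS r "context" == "suggest") && !(pvGetS r "context" == "auto_apply")
          && !(pvGetS r "context" == "render")) := by
  rw [rank_eq]; split_ifs <;> simp_all

-- ===== VERDICT (by name: the statement is the Claim_ definition above) =====
theorem gate_summary_py_spec : Claim_equal_gate_summary_py := by
  intro rec _
  unfold Spec_gate_summary_py gate_summary_py gate_summary_py_alt
  cases hgr : (PySem.Dict.mk rec).get? "gate_results" with
  | none => rfl
  | some gr =>
    by_cases hnil : gr = []
    · simp [hnil]
    · simp only [hnil, if_false]
      have hranks : ∀ x ∈ gr,
          (PySem.Dict.mk [("suggest", (0:Int)), ("auto_apply", 1), ("render", 2)]).getD (pvGetS x "context") 99 = 0 ∨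
          (PySem.Dict.mk [("suggest", (0:Int)), ("auto_apply", 1), ("render", 2)]).getD (pvGetS x "context") 99 = 1 ∨
          (PySem.Dict.mk [("suggest", (0:Int)), ("auto_apply", 1), ("render", 2)]).getD (pvGetS x "context") 99 = 2 ∨
          (PySem.Dict.mk [("suggest", (0:Int)), ("auto_apply", 1), ("render", 2)]).getD (pvGetS x "context") 99 = 99 := by
        intro x _
        rw [rank_eq]
        split_ifs <;> simp
      rw [List.filter_true]
      rw [PySem.List.foldl_append_singleton_eq_map, List.nil_append]
      rw [sorted2_buckets gr _ _ hranks]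
      rw [bucket_loop_eq gr [] [] [] []]
      simp only [List.nil_append]
      rw [List.filter_congr (fun a _ => rank0_iff a), List.filter_congr (fun a _ => rank1_iff a),
        List.filter_congr (fun a _ => rank2_iff a), List.filter_congr (fun a _ => rank99_iff a)]
      simp [List.append_assoc]
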